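-- pv_equiv track=rewrite | github.com/kaushikk1999/Career-Navigator-AI-Driven-Resume-Optimization-Skill-Alignment-Platform | phase1/normalizer.py | _find_contact_block
-- ===== SOURCE A (Python) =====
-- from typing import List, Tuple, Dict, Any, Iterable, Optional
--
-- def _find_contact_block(lines: List[str]) -> Tuple[int, int]:
--     """Heuristic: contact block spans from first non-empty line until the last of the
--     next 5 lines containing contact separators ("|", ",") or keywords (Email/Mobile/Phone).
--     Returns (start_idx, end_idx_exclusive)."""
--     n = len(lines)
--     start = 0
--     while start < n and not lines[start].strip():
--         start += 1
--     end = min(n, start + 1)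
--     for i in range(start, min(n, start + 6)):
--         t = lines[i].strip().lower()
--         if any(k in t for k in ("email", "mobile", "phone")) or "|" in t or "," in t:
--             end = i + 1
--     return (start, end)
-- ===== SOURCE B (Python) =====
-- def _find_contact_block(lines):
--     """Same heuristic over list suffixes instead of indices: a suffix-consuming loop
--     skips blanks, then a budget-carrying structural recursion accumulates an
--     Option-style last-match index from which end is derived afterwards."""
--     def scan(rest, i, budget, last):
--         if not rest or budget == 0:
--             return last
--         t = rest[0].strip().lower()
--         if "email" in t or "mobile" in t or "phone" in t or "|" in t or "," in t:
--             last = i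
--         return scan(rest[1:], i + 1, budget - 1, last)
--
--     rest, start = lines, 0
--     while rest and not rest[0].strip():
--         rest, start = rest[1:], start + 1
--     last = scan(rest, start, 6, None)
--     end = last + 1 if last is not None else min(len(lines), start + 1)
--     return (start, end)
-- ===== Notes on version B (the rewrite author's own statement) =====
-- stated objective: alternative
-- what changed: The index-based while/for loops with lines[i] lookups are replaced by recursion/iteration over list suffixes: a suffix-consuming skip loop, then a budget-carrying structural-recursive scanner that accumulates an optional last-match index from which end is derived afterwards.
import Mathlib
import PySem

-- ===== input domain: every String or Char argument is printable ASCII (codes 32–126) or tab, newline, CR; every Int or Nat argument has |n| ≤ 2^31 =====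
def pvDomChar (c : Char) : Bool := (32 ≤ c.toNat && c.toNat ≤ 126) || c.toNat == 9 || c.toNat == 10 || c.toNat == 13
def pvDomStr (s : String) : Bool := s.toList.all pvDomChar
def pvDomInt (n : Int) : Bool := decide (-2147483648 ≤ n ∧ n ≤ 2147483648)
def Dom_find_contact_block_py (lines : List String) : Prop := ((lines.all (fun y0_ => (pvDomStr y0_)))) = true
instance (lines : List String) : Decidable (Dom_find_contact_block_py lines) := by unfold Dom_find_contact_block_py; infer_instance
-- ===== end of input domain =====

-- B replaces A's index-based while/for loops by suffix-based traversals (a suffix-consuming skip, then a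
-- budget-carrying structural recursion accumulating an optional last-match index) (objective: alternative).

-- ===== PORT A =====
-- 'while start < n and not lines[start].strip(): start += 1' as structural recursion counting blanks
def pvSkip : List String → Int
  | [] => 0
  | s :: rest => if PySem.Str.strip s == "" then pvSkip rest + 1 else 0

-- 't = lines[i].strip().lower(); any(k in t for k in ("email","mobile","phone")) or "|" in t or "," in t'
def pvMatch (s : String) : Bool :=
  let t := PySem.Str.lower (PySem.Str.strip s)
  (["email", "mobile", "phone"].any (fun k => PySem.Str.isIn k t)) || PySem.Str.isIn "|" t || PySem.Str.isIn "," t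

def find_contact_block_py (lines : List String) : Int × Int :=
  let n : Int := lines.length
  let start : Int := pvSkip lines
  let e0 : Int := min n (start + 1)
  let e : Int := (PySem.List.pyRange start (min n (start + 6)) 1).foldl
      (fun e i => if pvMatch (PySem.List.pyGetD lines i "") then i + 1 else e) e0
  (start, e)

-- ===== PORT B =====
-- 'while rest and not rest[0].strip(): …' — returns the non-blank suffix with its start index
def pvSkipB : List String → Int → List String × Int
  | [], i => ([], i)
  | s :: rest, i => if PySem.Str.strip s == "" then pvSkipB rest (i + 1) else (s :: rest, i)

-- 'def scan(rest, i, budget, last): …' — budget-bounded scan accumulating the last match index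
def pvScanB : List String → Int → Int → Option Int → Option Int
  | [], _, _, last => last
  | s :: rest, i, b, last =>
      if b == 0 then last
      else pvScanB rest (i + 1) (b - 1) (if pvMatch s then some i else last)

def find_contact_block_py_alt (lines : List String) : Int × Int :=
  let p := pvSkipB lines 0
  let start := p.2
  let last := pvScanB p.1 start 6 none
  let e : Int := match last with
    | some l => l + 1
    | none => min (lines.length : Int) (start + 1)
  (start, e)

-- ===== PRECONDITION & SPEC =====
def Spec_find_contact_block_py (lines : List String) (out : Int × Int) : Prop := out = find_contact_block_py_alt lines
instance (lines : List String) (out : Int × Int) : Decidable (Spec_find_contact_block_py lines out) := by unfold Spec_find_contact_block_py; infer_instance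

-- ===== CLAIM (what is proved, stated in full; the proofs are below) =====
def Claim_equal_find_contact_block_py : Prop := ∀ (lines : List String), Dom_find_contact_block_py lines → Spec_find_contact_block_py lines (find_contact_block_py lines)

-- ===== LEMMAS AND PROOFS =====

theorem pvSkip_nonneg (lines : List String) : 0 ≤ pvSkip lines := by
  induction lines with
  | nil => simp [pvSkip]
  | cons s rest ih => simp only [pvSkip]; split <;> omega

-- B's skip returns the suffix at A's skip count, with the index advanced by that count
theorem pvSkipB_eq (lines : List String) (i : Int) :
    pvSkipB lines i = (lines.drop (pvSkip lines).toNat, i + pvSkip lines) := by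
  induction lines generalizing i with
  | nil => simp [pvSkipB, pvSkip]
  | cons s rest ih =>
      simp only [pvSkipB, pvSkip]
      split
      · rw [ih]
        have h := pvSkip_nonneg rest
        have : (pvSkip rest + 1).toNat = (pvSkip rest).toNat + 1 := by omega
        rw [this, List.drop_succ_cons, Prod.mk.injEq]
        exact ⟨rfl, by omega⟩
      · simp

-- the accumulator correspondence: A's end value versus B's optional last-match index
def pvElim (last : Option Int) (e0 : Int) : Int :=
  match last with
  | some l => l + 1
  | none => e0

-- A's index fold over the budgeted window equals B's structural scan of the suffix
theorem pvScan_eq (lines : List String) :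
    ∀ (rest : List String) (i b : Int) (last : Option Int) (e0 : Int), 0 ≤ i → 0 ≤ b →
    lines.drop i.toNat = rest →
    (PySem.List.pyRange i (min (lines.length : Int) (i + b)) 1).foldl
      (fun e j => if pvMatch (PySem.List.pyGetD lines j "") then j + 1 else e) (pvElim last e0)
    = pvElim (pvScanB rest i b last) e0 := by
  intro rest
  induction rest with
  | nil =>
      intro i b last e0 hi hb hdrop
      have hlen : (lines.length : Int) ≤ i := by
        have := List.drop_eq_nil_iff.mp hdrop
        omega
      rw [PySem.List.pyRange_one_eq_nil (by omega)]
      rfl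
  | cons s rest' ih =>
      intro i b last e0 hi hb hdrop
      have hlt : i.toNat < lines.length := by
        by_contra h
        rw [List.drop_eq_nil_of_le (by omega)] at hdrop
        exact List.cons_ne_nil _ _ hdrop.symm
      have hiltn : i < (lines.length : Int) := by omega
      by_cases hb0 : b = 0
      · subst hb0
        rw [PySem.List.pyRange_one_eq_nil (by omega)]
        simp [pvScanB]
      · have hget : PySem.List.pyGetD lines i "" = s := by
          have : lines[i.toNat]? = some s := by
            rw [← List.head?_drop, hdrop]; rfl
          simp [PySem.List.pyGetD, PySem.List.pyGet?, PySem.List.pyIdx?, hi, hiltn]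
          exact (List.getElem?_eq_some_iff.mp this).2
        rw [PySem.List.pyRange_one_cons (by omega), List.foldl_cons, hget]
        have hstep : (if pvMatch s then i + 1 else pvElim last e0)
            = pvElim (if pvMatch s then some i else last) e0 := by
          by_cases h : pvMatch s <;> simp [h, pvElim]
        rw [hstep]
        have hdrop' : lines.drop (i + 1).toNat = rest' := by
          have : (i + 1).toNat = i.toNat + 1 := by omega
          rw [this, ← List.drop_drop, hdrop]; rfl
        have := ih (i + 1) (b - 1) (if pvMatch s then some i else last) e0 (by omega) (by omega) hdrop'
        rw [show i + b = i + 1 + (b - 1) from by ring, this]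
        simp [pvScanB, hb0]

-- ===== VERDICT (by name: the statement is the Claim_ definition above) =====
theorem find_contact_block_py_spec : Claim_equal_find_contact_block_py := by
  intro lines _
  unfold Spec_find_contact_block_py find_contact_block_py find_contact_block_py_alt
  simp only [pvSkipB_eq, Int.zero_add]
  have h := pvScan_eq lines (lines.drop (pvSkip lines).toNat) (pvSkip lines) 6 none
      (min (lines.length : Int) (pvSkip lines + 1)) (pvSkip_nonneg lines) (by omega) rfl
  simp only [pvElim] at h
  rw [h]
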